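-- pv_equiv track=rewrite | github.com/bj0/aoc | 2017/d9.py | find_eog
-- ===== SOURCE A (Python) =====
-- def find_eog(chunk):
--     i = 0
--     n = len(chunk)
--     gc = 0
--     while i < n:
--         c = chunk[i]
--         if c == '>':  # end
--             return i, gc
--         elif c == '!':  # skip
--             i += 2
--             continue
--         i += 1
--         gc += 1
--     raise Exception("endless garbage")
-- ===== SOURCE B (Python) =====
-- def find_eog(chunk):
--     # Bulk-jump scan: use str.find to locate the next '!' and next '>' and
--     # count whole plain runs at once instead of testing every character.
--     n = len(chunk)
--     pos = 0
--     count = 0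
--     while pos < n:
--         k = chunk.find('!', pos)
--         j = chunk.find('>', pos)
--         if k == -1 or (j != -1 and j < k):
--             # no escape before the next '>' (if any)
--             if j == -1:
--                 break
--             return j, count + (j - pos)
--         count += k - pos
--         pos = k + 2
--     raise Exception("endless garbage")
-- ===== Notes on version B (the rewrite author's own statement) =====
-- stated objective: alternative
-- what changed: Replaced A's per-character while-loop (test every char, i += 2 on '!') by a bulk-jump scan: str.find locates the next '!' and the next '>', whole plain runs are added to the garbage count at once (gc += k - pos) and the position jumps over each escape.
import Mathlib
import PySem

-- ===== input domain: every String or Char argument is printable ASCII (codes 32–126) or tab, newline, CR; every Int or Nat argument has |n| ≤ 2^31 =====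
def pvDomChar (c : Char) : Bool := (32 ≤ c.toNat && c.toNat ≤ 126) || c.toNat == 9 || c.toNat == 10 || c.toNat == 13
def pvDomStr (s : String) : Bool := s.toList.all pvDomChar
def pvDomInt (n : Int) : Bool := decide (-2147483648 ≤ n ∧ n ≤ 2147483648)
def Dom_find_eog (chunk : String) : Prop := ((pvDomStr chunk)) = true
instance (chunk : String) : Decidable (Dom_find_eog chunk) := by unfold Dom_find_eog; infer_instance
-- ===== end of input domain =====

-- B replaces A's one-character-at-a-time scan by bulk jumps: str.find locates the next '!' and the
-- next '>', whole plain runs are counted at once (gc += k - pos) instead of char by char; same O(n)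
-- worst case, a different decomposition. On inputs where the Pythons raise (no reachable unescaped
-- '>'), Pre_ excludes them and the ports return (-1, -1).

-- ===== PORT A =====
-- while i < n loop of A, index i only grows, so it is a Nat here; (-1,-1) marks the raise (outside Pre_).
def findEogLoopA (l : List Char) (i : Nat) (gc : Int) : Int × Int :=
  if h : i < l.length then
    let c := l[i]
    if c = '>' then ((i : Int), gc)
    else if c = '!' then findEogLoopA l (i + 2) gc
    else findEogLoopA l (i + 1) (gc + 1)
  else (-1, -1)
termination_by l.length - i

def find_eog (chunk : String) : Int × Int :=
  findEogLoopA chunk.toList 0 0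

-- ===== PORT B =====
-- Source B's while-loop: chunk.find('!', pos) / chunk.find('>', pos) pick the next specials, a whole
-- plain run is added to gc at once; (-1,-1) marks the raise (outside Pre_).
def findEogLoopB (l : List Char) (pos : Nat) (gc : Int) : Int × Int :=
  if h : pos < l.length then
    let k := PySem.Chars.findFrom l ['!'] (pos : Int)
    let j := PySem.Chars.findFrom l ['>'] (pos : Int)
    if k = -1 ∨ (j ≠ -1 ∧ j < k) then
      if j = -1 then (-1, -1)
      else (j, gc + (j - (pos : Int)))
    else findEogLoopB l (k.toNat + 2) (gc + (k - (pos : Int)))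
  else (-1, -1)
termination_by l.length - pos
decreasing_by
  rename_i hcond
  have hk : PySem.Chars.findFrom l ['!'] (pos : Int) ≠ -1 := fun hc => hcond (Or.inl hc)
  have := (PySem.Chars.findFrom_natCast_spec l ['!'] pos (Nat.le_of_lt h) hk).1
  omega

def find_eog_alt (chunk : String) : Int × Int :=
  findEogLoopB chunk.toList 0 0

-- ===== PRECONDITION & SPEC =====
-- Pre_: some '>' is preceded by an even-length maximal run of '!'; exactly the inputs where Python A
-- (and Python B) return instead of raising Exception("endless garbage").
def Pre_find_eog (chunk : String) : Prop :=
  ∃ i, i < chunk.toList.length ∧ chunk.toList.getD i ' ' = '>' ∧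
    ((chunk.toList.take i).reverse.takeWhile (· = '!')).length % 2 = 0

instance (chunk : String) : Decidable (Pre_find_eog chunk) := by unfold Pre_find_eog; infer_instance

def pvWitness_find_eog : String := "!!a>"

def Spec_find_eog (chunk : String) (out : Int × Int) : Prop := out = find_eog_alt chunk
instance (chunk : String) (out : Int × Int) : Decidable (Spec_find_eog chunk out) := by unfold Spec_find_eog; infer_instance

-- ===== CLAIM (what is proved, stated in full; the proofs are below) =====
def Claim_equal_find_eog : Prop := ∀ (chunk : String), Dom_find_eog chunk → Pre_find_eog chunk → Spec_find_eog chunk (find_eog chunk)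

-- ===== LEMMAS AND PROOFS =====

-- [c] is a prefix of l.drop i exactly when l has character c at index i.
theorem singleton_prefix_drop {l : List Char} {i : Nat} {c : Char} :
    [c] <+: l.drop i ↔ l[i]? = some c := by
  cases hd : l.drop i with
  | nil =>
    have hle : l.length ≤ i := List.drop_eq_nil_iff.1 hd
    simp [List.getElem?_eq_none hle]
  | cons a t =>
    have hlt : i < l.length := by
      by_contra hge
      rw [List.drop_eq_nil_of_le (by omega)] at hd; exact absurd hd (by simp)
    have hget : l[i]? = some a := by
      have := List.drop_eq_getElem_cons (l := l) hlt
      rw [hd] at this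
      rw [List.getElem?_eq_getElem hlt, List.cons.injEq] at *
      simp [this.1]
    rw [hget]
    constructor
    · rintro ⟨r, hr⟩
      simp only [List.cons_append, List.nil_append, List.cons.injEq] at hr
      simp [hr.1]
    · intro he
      exact ⟨t, by simp at he; simp [he]⟩

-- An occurrence of [c] at or after pos is an occurrence inside l.drop pos.
theorem plain_of_not_infix {l : List Char} {pos m : Nat} {c : Char} (hpm : pos ≤ m)
    (hm : m < l.length) (hno : ¬ [c] <:+: l.drop pos) : l[m] ≠ c := by
  intro he
  apply hno
  have hpref : [c] <+: l.drop m :=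
    singleton_prefix_drop.2 (by rw [List.getElem?_eq_getElem hm, he])
  have hdd : l.drop m = (l.drop pos).drop (m - pos) := by
    rw [List.drop_drop]; congr 1; omega
  rw [hdd] at hpref
  exact hpref.isInfix.trans (List.drop_suffix _ _).isInfix

-- One-step equation lemmas (rewrite only the applied occurrence).
theorem loopA_eq (l : List Char) (i : Nat) (gc : Int) :
    findEogLoopA l i gc = if h : i < l.length then
      (if l[i] = '>' then ((i : Int), gc)
       else if l[i] = '!' then findEogLoopA l (i + 2) gc
       else findEogLoopA l (i + 1) (gc + 1))
    else (-1, -1) := by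
  conv_lhs => rw [findEogLoopA]

theorem loopB_eq (l : List Char) (pos : Nat) (gc : Int) :
    findEogLoopB l pos gc = if _h : pos < l.length then
      (if PySem.Chars.findFrom l ['!'] (pos : Int) = -1 ∨
          (PySem.Chars.findFrom l ['>'] (pos : Int) ≠ -1 ∧
           PySem.Chars.findFrom l ['>'] (pos : Int) < PySem.Chars.findFrom l ['!'] (pos : Int)) then
        (if PySem.Chars.findFrom l ['>'] (pos : Int) = -1 then (-1, -1)
         else (PySem.Chars.findFrom l ['>'] (pos : Int),
               gc + (PySem.Chars.findFrom l ['>'] (pos : Int) - (pos : Int))))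
      else findEogLoopB l ((PySem.Chars.findFrom l ['!'] (pos : Int)).toNat + 2)
             (gc + (PySem.Chars.findFrom l ['!'] (pos : Int) - (pos : Int))))
    else (-1, -1) := by
  conv_lhs => rw [findEogLoopB]

-- A skips a plain run in single steps: if every index in [pos, j) holds neither '>' nor '!',
-- restarting A at j with gc advanced by the run length gives the same result.
theorem loopA_skip (l : List Char) (pos j : Nat) (gc : Int)
    (hpj : pos ≤ j) (hj : j ≤ l.length)
    (hplain : ∀ m, pos ≤ m → m < j → (hm : m < l.length) → l[m] ≠ '>' ∧ l[m] ≠ '!') :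
    findEogLoopA l pos gc = findEogLoopA l j (gc + ((j : Int) - (pos : Int))) := by
  generalize hd : j - pos = m
  induction m generalizing pos gc with
  | zero =>
    have : pos = j := by omega
    subst this
    norm_num
  | succ m ih =>
    have hpos : pos < j := by omega
    have hlt : pos < l.length := lt_of_lt_of_le hpos hj
    have hp := hplain pos le_rfl hpos hlt
    rw [loopA_eq l pos gc, dif_pos hlt, if_neg hp.1, if_neg hp.2,
        ih (pos + 1) (gc + 1) (by omega)
        (fun m h1 h2 h3 => hplain m (by omega) h2 h3) (by omega)]
    congr 1
    push_cast
    ring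

-- The bulk-jump loop computes what the character loop computes.
theorem loopB_eq_loopA (l : List Char) (pos : Nat) (gc : Int) :
    findEogLoopB l pos gc = findEogLoopA l pos gc := by
  generalize hm : l.length - pos = m
  induction m using Nat.strong_induction_on generalizing pos gc with
  | _ m ih =>
  by_cases h : pos < l.length
  · have hple : pos ≤ l.length := Nat.le_of_lt h
    rw [loopB_eq l pos gc, dif_pos h]
    by_cases hcond : PySem.Chars.findFrom l ['!'] (pos : Int) = -1 ∨
        (PySem.Chars.findFrom l ['>'] (pos : Int) ≠ -1 ∧
         PySem.Chars.findFrom l ['>'] (pos : Int) < PySem.Chars.findFrom l ['!'] (pos : Int))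
    · rw [if_pos hcond]
      by_cases hj : PySem.Chars.findFrom l ['>'] (pos : Int) = -1
      · rw [if_pos hj]
        have hk : PySem.Chars.findFrom l ['!'] (pos : Int) = -1 := by
          rcases hcond with h' | h'
          · exact h'
          · exact absurd hj h'.1
        have hnogt := (PySem.Chars.findFrom_natCast_eq_neg_one_iff l ['>'] pos hple).1 hj
        have hnobang := (PySem.Chars.findFrom_natCast_eq_neg_one_iff l ['!'] pos hple).1 hk
        rw [loopA_skip l pos l.length gc hple le_rfl
            (fun m h1 h2 h3 =>
              ⟨plain_of_not_infix h1 h3 hnogt, plain_of_not_infix h1 h3 hnobang⟩)]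
        rw [loopA_eq, dif_neg (lt_irrefl _)]
      · rw [if_neg hj]
        have hspecj := PySem.Chars.findFrom_natCast_spec l ['>'] pos hple hj
        have hj0 : (0 : Int) ≤ PySem.Chars.findFrom l ['>'] (pos : Int) := by
          have := hspecj.1; omega
        have hjlt : (PySem.Chars.findFrom l ['>'] (pos : Int)).toNat < l.length := by
          by_contra hge
          have := hspecj.2.1
          rw [List.drop_eq_nil_of_le (by omega)] at this
          simp at this
        have hgt : l[(PySem.Chars.findFrom l ['>'] (pos : Int)).toNat] = '>' := by
          have := singleton_prefix_drop.1 hspecj.2.1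
          rwa [List.getElem?_eq_getElem hjlt, Option.some.injEq] at this
        have hplain : ∀ m, pos ≤ m → m < (PySem.Chars.findFrom l ['>'] (pos : Int)).toNat →
            (hm : m < l.length) → l[m] ≠ '>' ∧ l[m] ≠ '!' := by
          intro m h1 h2 h3
          refine ⟨fun he => hspecj.2.2 m h1 h2 (singleton_prefix_drop.2 ?_), ?_⟩
          · rw [List.getElem?_eq_getElem h3, he]
          · rcases hcond with h' | h'
            · exact plain_of_not_infix h1 h3
                ((PySem.Chars.findFrom_natCast_eq_neg_one_iff l ['!'] pos hple).1 h')
            · have hspeck := PySem.Chars.findFrom_natCast_spec l ['!'] pos hple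
                (by intro hc; rw [hc] at h'; omega)
              intro he
              exact hspeck.2.2 m h1 (by omega) (singleton_prefix_drop.2
                (by rw [List.getElem?_eq_getElem h3, he]))
        rw [loopA_skip l pos (PySem.Chars.findFrom l ['>'] (pos : Int)).toNat gc
            (by omega) (Nat.le_of_lt hjlt) hplain]
        rw [loopA_eq, dif_pos hjlt, if_pos hgt, Int.toNat_of_nonneg hj0]
    · rw [if_neg hcond]
      have hk : PySem.Chars.findFrom l ['!'] (pos : Int) ≠ -1 := fun hc => hcond (Or.inl hc)
      have hspeck := PySem.Chars.findFrom_natCast_spec l ['!'] pos hple hk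
      have hk0 : (0 : Int) ≤ PySem.Chars.findFrom l ['!'] (pos : Int) := by
        have := hspeck.1; omega
      have hklt : (PySem.Chars.findFrom l ['!'] (pos : Int)).toNat < l.length := by
        by_contra hge
        have := hspeck.2.1
        rw [List.drop_eq_nil_of_le (by omega)] at this
        simp at this
      have hbang : l[(PySem.Chars.findFrom l ['!'] (pos : Int)).toNat] = '!' := by
        have := singleton_prefix_drop.1 hspeck.2.1
        rwa [List.getElem?_eq_getElem hklt, Option.some.injEq] at this
      have hplain : ∀ m, pos ≤ m → m < (PySem.Chars.findFrom l ['!'] (pos : Int)).toNat →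
          (hm : m < l.length) → l[m] ≠ '>' ∧ l[m] ≠ '!' := by
        intro m h1 h2 h3
        refine ⟨?_, fun he => hspeck.2.2 m h1 h2 (singleton_prefix_drop.2
          (by rw [List.getElem?_eq_getElem h3, he]))⟩
        by_cases hj : PySem.Chars.findFrom l ['>'] (pos : Int) = -1
        · exact plain_of_not_infix h1 h3
            ((PySem.Chars.findFrom_natCast_eq_neg_one_iff l ['>'] pos hple).1 hj)
        · have hkj : PySem.Chars.findFrom l ['!'] (pos : Int) ≤
              PySem.Chars.findFrom l ['>'] (pos : Int) := by
            by_contra hlt'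
            exact hcond (Or.inr ⟨hj, by omega⟩)
          have hspecj := PySem.Chars.findFrom_natCast_spec l ['>'] pos hple hj
          intro he
          exact hspecj.2.2 m h1 (by omega) (singleton_prefix_drop.2
            (by rw [List.getElem?_eq_getElem h3, he]))
      rw [loopA_skip l pos (PySem.Chars.findFrom l ['!'] (pos : Int)).toNat gc
          (by omega) (Nat.le_of_lt hklt) hplain]
      rw [loopA_eq, dif_pos hklt, if_neg (by rw [hbang]; decide), if_pos hbang]
      rw [← ih (l.length - ((PySem.Chars.findFrom l ['!'] (pos : Int)).toNat + 2))
          (by omega) ((PySem.Chars.findFrom l ['!'] (pos : Int)).toNat + 2) _ rfl]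
      congr 1
      rw [Int.toNat_of_nonneg hk0]
  · rw [loopB_eq, loopA_eq, dif_neg h, dif_neg h]

theorem find_eog_eq (chunk : String) : find_eog chunk = find_eog_alt chunk := by
  unfold find_eog find_eog_alt
  exact (loopB_eq_loopA chunk.toList 0 0).symm

-- ===== VERDICT (by name: the statement is the Claim_ definition above) =====
theorem find_eog_spec : Claim_equal_find_eog := by
  intro chunk _ _
  unfold Spec_find_eog
  exact find_eog_eq chunk
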